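-- pv_equiv track=rewrite | github.com/hwanginbeom/algorithm_study | 2.algorithm_test/22.01.28/22.01.28_wooseok.py | solution
-- ===== SOURCE A (Python) =====
-- def solution(board, moves):
--     answer = 0
--
--     length = len(board)
--     board.reverse()
--     new_board = []
--
--     for i in range(length):
--         temp = []
--
--         for j in range(length):
--             if board[j][i] != 0:
--                 temp.append(board[j][i])
--             else:
--                 new_board.append(temp)
--                 break
--         else:
--             new_board.append(temp)
--
--     stack = []
--     for move in moves:
--         if new_board[move - 1]:
--             stack.append(new_board[move - 1].pop())
--
--         if len(stack) >= 2:
--             if stack[-1] == stack[-2]: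
--                 stack.pop()
--                 stack.pop()
--                 answer += 2
--
--     return answer
-- ===== SOURCE B (Python) =====
-- def solution(board, moves):
--     board.reverse()  # same in-place reversal side effect as the original
--     n = len(board)
--     # full columns of the reversed board (zeros included), read once
--     cols = [[row[c] for row in board] for c in range(n)]
--     # per-column height = number of dolls stacked above the first empty cell
--     heights = []
--     for c in range(n):
--         h = 0
--         while h < n and cols[c][h] != 0:
--             h += 1
--         heights.append(h)
--     # pass 1: the sequence of dolls the crane picks up, via height counters only
--     picked = []
--     for m in moves:
--         h = heights[m - 1]
--         if h:
--             heights[m - 1] = h - 1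
--             picked.append(cols[m - 1][h - 1])
--     # pass 2: count dolls destroyed by adjacent-pair cancellation
--     answer = 0
--     stack = []
--     for doll in picked:
--         if stack and stack[-1] == doll:
--             stack.pop()
--             answer += 2
--         else:
--             stack.append(doll)
--     return answer
-- ===== Notes on version B (the rewrite author's own statement) =====
-- stated objective: alternative
-- what changed: B keeps per-column integer height counters over an immutable full-column table instead of A's truncated mutable column stacks popped in place, and splits the simulation into two staged passes: first produce the picked-doll sequence, then a separate cancellation scan with check-before-append (A interleaves popping with an append-then-compare-last-two stack in one loop).
-- outside the precondition, e.g. on solution([[1], [0, 0]], [1]): A returns 0, B raises IndexError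
import Mathlib
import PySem

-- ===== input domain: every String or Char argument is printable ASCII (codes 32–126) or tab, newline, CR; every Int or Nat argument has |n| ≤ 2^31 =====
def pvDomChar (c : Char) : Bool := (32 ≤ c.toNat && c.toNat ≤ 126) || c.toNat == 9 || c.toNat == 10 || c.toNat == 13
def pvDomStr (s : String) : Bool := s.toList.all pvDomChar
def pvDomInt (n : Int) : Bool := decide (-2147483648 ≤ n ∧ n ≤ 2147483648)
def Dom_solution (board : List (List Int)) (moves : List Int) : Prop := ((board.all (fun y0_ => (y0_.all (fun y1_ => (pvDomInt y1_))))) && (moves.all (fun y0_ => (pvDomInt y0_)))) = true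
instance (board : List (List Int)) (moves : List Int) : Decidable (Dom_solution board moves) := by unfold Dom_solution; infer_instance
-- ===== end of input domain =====

-- B replaces A's truncated mutable column stacks by integer height counters over an immutable
-- full-column table and runs in two staged passes (pick sequence, then a separate cancellation
-- scan); both Pythons reverse `board` in place (identical mutation), the theorem is about the
-- return value.

-- ===== PORT A =====
-- inner 'for j in range(length): … break / else' loop of A, building one column
def solColA (b : List (List Int)) (i : Int) : List Int → List Int → List Int
  | [], temp => temp
  | j :: js, temp =>
    if PySem.List.pyGetD (PySem.List.pyGetD b j []) i 0 ≠ 0 then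
      solColA b i js (temp ++ [PySem.List.pyGetD (PySem.List.pyGetD b j []) i 0])
    else temp

-- body of A's 'for move in moves' loop, state = (new_board, stack, answer)
def solStepA (st : List (List Int) × List Int × Int) (move : Int) :
    List (List Int) × List Int × Int :=
  let nb := st.1
  let col := PySem.List.pyGetD nb (move - 1) []
  let nb2 := if col ≠ [] then PySem.List.pySetD nb (move - 1) col.dropLast else nb
  let stack2 := if col ≠ [] then st.2.1 ++ [PySem.List.pyGetD col (-1) 0] else st.2.1
  if 2 ≤ stack2.length then
    if PySem.List.pyGetD stack2 (-1) 0 = PySem.List.pyGetD stack2 (-2) 0 then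
      (nb2, stack2.dropLast.dropLast, st.2.2 + 2)
    else (nb2, stack2, st.2.2)
  else (nb2, stack2, st.2.2)

def solution (board : List (List Int)) (moves : List Int) : Int :=
  let length := board.length
  let b := board.reverse
  let new_board := (PySem.List.pyRange 0 (length : Int) 1).map
    (fun i => solColA b i (PySem.List.pyRange 0 (length : Int) 1) [])
  (moves.foldl solStepA (new_board, [], 0)).2.2

-- ===== PORT B =====
-- B's 'while h < n and cols[c][h] != 0: h += 1' loop
def hWhileB (col : List Int) (n : Nat) (h : Nat) : Nat :=
  if _hlt : h < n then
    if PySem.List.pyGetD col (h : Int) 0 ≠ 0 then hWhileB col n (h + 1) else h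
  else h
termination_by n - h

-- body of B's pick loop, state = (heights, picked)
def pickStepB (cols : List (List Int)) (st : List Int × List Int) (m : Int) :
    List Int × List Int :=
  let h := PySem.List.pyGetD st.1 (m - 1) 0
  if h ≠ 0 then
    (PySem.List.pySetD st.1 (m - 1) (h - 1),
     st.2 ++ [PySem.List.pyGetD (PySem.List.pyGetD cols (m - 1) []) (h - 1) 0])
  else st

-- body of B's cancellation scan, state = (stack, answer)
def cancelStepB (st : List Int × Int) (doll : Int) : List Int × Int :=
  if st.1 ≠ [] ∧ PySem.List.pyGetD st.1 (-1) 0 = doll then (st.1.dropLast, st.2 + 2)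
  else (st.1 ++ [doll], st.2)

def solution_alt (board : List (List Int)) (moves : List Int) : Int :=
  let b := board.reverse
  let n := board.length
  let cols := (PySem.List.pyRange 0 (n : Int) 1).map
    (fun c => b.map (fun row => PySem.List.pyGetD row c 0))
  let heights := (PySem.List.pyRange 0 (n : Int) 1).map
    (fun c => ((hWhileB (PySem.List.pyGetD cols c []) n 0 : Nat) : Int))
  let picked := (moves.foldl (pickStepB cols) (heights, [])).2
  (picked.foldl cancelStepB ([], 0)).2

-- ===== PRECONDITION & SPEC =====
-- Pre_ excludes exactly inputs on which a Python IndexError occurs: rows shorter than the board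
-- (A returns there only when a zero shields the short row, but B's full-column read raises —
-- see claim cites) and moves outside 1-n..n (negative list indexing accepts down to 1-n; both
-- programs treat that range identically).
def Pre_solution (board : List (List Int)) (moves : List Int) : Prop :=
  (∀ row ∈ board, board.length ≤ row.length) ∧
  (∀ m ∈ moves, 1 - (board.length : Int) ≤ m ∧ m ≤ (board.length : Int))
instance (board : List (List Int)) (moves : List Int) : Decidable (Pre_solution board moves) := by
  unfold Pre_solution; infer_instance

def pvWitness_solution : List (List Int) × List Int :=
  ([[0, 0, 0], [1, 0, 2], [3, 2, 2]], [1, 2, 3, 3, 2, 1])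

def Spec_solution (board : List (List Int)) (moves : List Int) (out : Int) : Prop := out = solution_alt board moves
instance (board : List (List Int)) (moves : List Int) (out : Int) : Decidable (Spec_solution board moves out) := by unfold Spec_solution; infer_instance

-- ===== CLAIM (what is proved, stated in full; the proofs are below) =====
def Claim_equal_solution : Prop := ∀ (board : List (List Int)) (moves : List Int), Dom_solution board moves → Pre_solution board moves → Spec_solution board moves (solution board moves)

-- ===== LEMMAS AND PROOFS =====

-- proof-side helper: the truncated column (dolls of column c, bottom of pile last)
def solColB : List (List Int) → Int → List Int
  | [], _ => []
  | row :: rows, c =>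
    if PySem.List.pyGetD row c 0 = 0 then []
    else PySem.List.pyGetD row c 0 :: solColB rows c

-- proof-side helper: the sequence of dolls B picks, as a pure recursion
def pickSeq (cols : List (List Int)) : List Int → List Int → List Int
  | _, [] => []
  | H, m :: ms =>
    let h := PySem.List.pyGetD H (m - 1) 0
    if h ≠ 0 then
      PySem.List.pyGetD (PySem.List.pyGetD cols (m - 1) []) (h - 1) 0 ::
        pickSeq cols (PySem.List.pySetD H (m - 1) (h - 1)) ms
    else pickSeq cols H ms

-- A's index-driven column build equals the structural row scan solColB
lemma col_eq (b : List (List Int)) (i : Int) :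
    ∀ (suffix : List (List Int)) (k : Nat) (temp : List Int), b.drop k = suffix →
      solColA b i (PySem.List.pyRange (k : Int) (b.length : Int) 1) temp
        = temp ++ solColB suffix i := by
  intro suffix
  induction suffix with
  | nil =>
    intro k temp hk
    have hlen : b.length ≤ k := by
      by_contra h
      have := congrArg List.length hk
      simp at this
      omega
    rw [PySem.List.pyRange_one_eq_nil (by exact_mod_cast hlen)]
    simp [solColA, solColB]
  | cons row rows ih =>
    intro k temp hk
    have hlt : k < b.length := by
      by_contra h
      rw [List.drop_eq_nil_of_le (by omega)] at hk
      cases hk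
    have hget : b[k]'hlt = row := by
      have h0 : (b.drop k)[0]'(by simp [hk]) = row := by simp [hk]
      rw [List.getElem_drop] at h0
      simpa using h0
    have hdrop : b.drop (k + 1) = rows := by
      rw [← List.drop_drop]; simp [hk]
    rw [PySem.List.pyRange_one_cons (by exact_mod_cast hlt)]
    have hbk : PySem.List.pyGetD b (k : Int) [] = row := by
      rw [PySem.List.pyGetD_natCast]
      simp [List.getD_eq_getElem?_getD, List.getElem?_eq_getElem hlt, hget]
    simp only [solColA, hbk]
    simp only [solColB]
    by_cases hv : PySem.List.pyGetD row i 0 = 0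
    · simp [hv]
    · rw [if_pos (by simpa using hv), if_neg hv]
      rw [show ((k : Int) + 1) = ((k + 1 : Nat) : Int) by push_cast; ring]
      rw [ih (k + 1) _ hdrop]
      simp

-- solColB is a prefix of the full column
lemma solColB_prefix (b : List (List Int)) (c : Int) :
    solColB b c = (b.map (fun row => PySem.List.pyGetD row c 0)).take (solColB b c).length := by
  induction b with
  | nil => simp [solColB]
  | cons row rows ih =>
    simp only [solColB, List.map_cons]
    by_cases hv : PySem.List.pyGetD row c 0 = 0
    · simp [hv]
    · rw [if_neg hv]
      simp only [List.length_cons, List.take_succ_cons]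
      rw [← ih]

-- B's while loop computes the truncated column's length
lemma hWhile_eq (b : List (List Int)) (c : Int) :
    ∀ (h : Nat), b.drop h ≠ [] ∨ h ≤ b.length →
      hWhileB (b.map (fun row => PySem.List.pyGetD row c 0)) b.length h
        = h + (solColB (b.drop h) c).length := by
  intro h
  induction hfuel : b.length - h using Nat.strong_induction_on generalizing h with
  | _ fuel ih =>
    intro _
    rw [hWhileB]
    by_cases hlt : h < b.length
    · have hcons : b.drop h = b[h] :: b.drop (h + 1) := by
        rw [List.drop_eq_getElem_cons hlt]
      have hcol : PySem.List.pyGetD (b.map (fun row => PySem.List.pyGetD row c 0)) (h : Int) 0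
          = PySem.List.pyGetD b[h] c 0 := by
        rw [PySem.List.pyGetD_natCast]
        simp [List.getD_eq_getElem?_getD, List.getElem?_map, List.getElem?_eq_getElem hlt]
      rw [dif_pos hlt, hcol]
      by_cases hv : PySem.List.pyGetD b[h] c 0 = 0
      · rw [if_neg (by simpa using hv), hcons]
        simp [solColB, hv]
      · rw [if_pos hv]
        rw [ih (b.length - (h + 1)) (by omega) (h + 1) rfl (Or.inr (by omega))]
        rw [hcons]
        simp only [solColB, if_neg hv]
        simp
        omega
    · rw [dif_neg hlt]
      rw [List.drop_eq_nil_of_le (by omega)]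
      simp [solColB]

-- pyGetD / pySetD through a resolved index
lemma pyIdx_lt {n : Nat} {i : Int} {k : Nat} (h : PySem.List.pyIdx? n i = some k) : k < n := by
  simp only [PySem.List.pyIdx?] at h
  split_ifs at h with h1 h2 h3 <;> simp_all <;> omega
lemma pyGetD_of_idx {α : Type} (xs : List α) (i : Int) (d : α) (k : Nat)
    (h : PySem.List.pyIdx? xs.length i = some k) :
    PySem.List.pyGetD xs i d = xs[k]'(pyIdx_lt h) := by
  simp [PySem.List.pyGetD, PySem.List.pyGet?, h, List.getElem?_eq_getElem (pyIdx_lt h)]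
lemma pyGetD_of_idx_none {α : Type} (xs : List α) (i : Int) (d : α)
    (h : PySem.List.pyIdx? xs.length i = none) :
    PySem.List.pyGetD xs i d = d := by
  simp [PySem.List.pyGetD, PySem.List.pyGet?, h]
lemma pySetD_of_idx {α : Type} (xs : List α) (i : Int) (v : α) (k : Nat)
    (h : PySem.List.pyIdx? xs.length i = some k) :
    PySem.List.pySetD xs i v = xs.set k v := by
  simp [PySem.List.pySetD, PySem.List.pySet?, h]

-- in a stack whose adjacent entries differ, the two top entries differ
lemma chain_top_two (S : List Int) (h : List.IsChain (· ≠ ·) S) (h2 : 2 ≤ S.length) :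
    S[S.length-1]'(by omega) ≠ S[S.length-2]'(by omega) := by
  rw [List.isChain_iff_getElem] at h
  have := h (S.length-2) (by omega)
  simp only [show S.length-2+1 = S.length-1 by omega] at this
  exact fun e => this e.symm

-- when nothing is pushed, A's trailing stack check is a no-op on a chain stack
lemma stepA_noop (L : List (List Int)) (S : List Int) (ans : Int) (m : Int)
    (hS : List.IsChain (· ≠ ·) S) (hc : PySem.List.pyGetD L (m - 1) [] = []) :
    solStepA (L, S, ans) m = (L, S, ans) := by
  simp only [solStepA, hc]
  simp only [ne_eq, not_true_eq_false, if_false]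
  by_cases h2 : 2 ≤ S.length
  · rw [if_pos h2, if_neg]
    have hne : S ≠ [] := by intro h; subst h; simp at h2
    rw [PySem.List.pyGetD_neg_one S 0 hne,
      PySem.List.pyGetD_neg_ofNat S 2 0 (by omega) (by simpa using h2),
      List.getLast_eq_getElem]
    exact chain_top_two S hS h2
  · rw [if_neg h2]

-- B's pick fold accumulates exactly pickSeq
lemma pickFold_eq (cols : List (List Int)) :
    ∀ (ms : List Int) (H acc : List Int),
      (ms.foldl (pickStepB cols) (H, acc)).2 = acc ++ pickSeq cols H ms := by
  intro ms
  induction ms with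
  | nil => intro H acc; simp [pickSeq]
  | cons m ms ih =>
    intro H acc
    simp only [List.foldl_cons, pickStepB, pickSeq]
    by_cases h : PySem.List.pyGetD H (m - 1) 0 ≠ 0
    · rw [if_pos h, if_pos h]
      rw [ih]
      simp
    · rw [if_neg h, if_neg h]
      exact ih H acc

lemma take_dropLast (l : List Int) (n : Nat) (h : n ≤ l.length) :
    (l.take n).dropLast = l.take (n - 1) := by
  rw [List.dropLast_eq_take, List.length_take, List.take_take]
  congr 1
  omega

-- the moves loop of A, from a state matching B's heights, yields the cancellation scan of pickSeq
lemma loop_eq (cols : List (List Int)) :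
    ∀ (ms : List Int) (L : List (List Int)) (H S : List Int) (ans : Int),
      L.length = cols.length → H.length = cols.length →
      (∀ k, k < cols.length →
        H.getD k 0 = ((L.getD k []).length : Int) ∧
        L.getD k [] = (cols.getD k []).take (L.getD k []).length) →
      List.IsChain (· ≠ ·) S →
      (ms.foldl solStepA (L, S, ans)).2.2
        = ((pickSeq cols H ms).foldl cancelStepB (S, ans)).2 := by
  intro ms
  induction ms with
  | nil => intro L H S ans _ _ _ _; rfl
  | cons m ms ih =>
    intro L H S ans hLl hHl hInv hS
    simp only [List.foldl_cons, pickSeq]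
    cases hidx : PySem.List.pyIdx? cols.length (m - 1) with
    | none =>
      have hcL : PySem.List.pyGetD L (m - 1) [] = [] :=
        pyGetD_of_idx_none L (m - 1) [] (by rw [hLl]; exact hidx)
      have hcH : PySem.List.pyGetD H (m - 1) 0 = 0 :=
        pyGetD_of_idx_none H (m - 1) 0 (by rw [hHl]; exact hidx)
      rw [stepA_noop L S ans m hS hcL, hcH]
      simp only [ne_eq, not_true_eq_false, if_false]
      exact ih L H S ans hLl hHl hInv hS
    | some k =>
      have hk : k < cols.length := pyIdx_lt hidx
      have hcL : PySem.List.pyGetD L (m - 1) [] = L.getD k [] := by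
        rw [pyGetD_of_idx L (m - 1) [] k (by rw [hLl]; exact hidx)]
        rw [List.getD_eq_getElem?_getD, List.getElem?_eq_getElem (by omega)]
        rfl
      have hcH : PySem.List.pyGetD H (m - 1) 0 = H.getD k 0 := by
        rw [pyGetD_of_idx H (m - 1) 0 k (by rw [hHl]; exact hidx)]
        rw [List.getD_eq_getElem?_getD, List.getElem?_eq_getElem (by omega)]
        rfl
      have hInvk := hInv k hk
      by_cases hcol : L.getD k [] = []
      · have hH0 : PySem.List.pyGetD H (m - 1) 0 = 0 := by
          rw [hcH, hInvk.1, hcol]; rfl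
        rw [stepA_noop L S ans m hS (by rw [hcL, hcol]), hH0]
        simp only [ne_eq, not_true_eq_false, if_false]
        exact ih L H S ans hLl hHl hInv hS
      · -- a doll is picked
        set colL := L.getD k [] with hcolL
        set len := colL.length with hlendef
        have hlen1 : 1 ≤ len := by
          rcases List.eq_nil_or_concat colL with h | ⟨l, a, h⟩
          · exact absurd h hcol
          · simp [hlendef, h]
        have hlenle : len ≤ (cols.getD k []).length := by
          have := congrArg List.length hInvk.2
          simp only [List.length_take] at this
          omega
        have hH : PySem.List.pyGetD H (m - 1) 0 = (len : Int) := by rw [hcH, hInvk.1]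
        have hHne : (len : Int) ≠ 0 := by exact_mod_cast Nat.one_le_iff_ne_zero.mp hlen1
        -- the doll B reads equals the doll A pops
        have hdollB : PySem.List.pyGetD (PySem.List.pyGetD cols (m - 1) [])
            ((len : Int) - 1) 0 = colL.getLast hcol := by
          have hcolsk : PySem.List.pyGetD cols (m - 1) [] = cols.getD k [] := by
            rw [pyGetD_of_idx cols (m - 1) [] k hidx]
            rw [List.getD_eq_getElem?_getD, List.getElem?_eq_getElem (by omega)]
            rfl
          rw [hcolsk, show ((len : Int) - 1) = ((len - 1 : Nat) : Int) by push_cast [hlen1]; ring]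
          rw [PySem.List.pyGetD_natCast]
          rw [List.getD_eq_getElem?_getD]
          have h1 : colL[len - 1]? = some (colL.getLast hcol) := by
            rw [List.getLast_eq_getElem, ← List.getElem?_eq_getElem (by omega)]
          have hq : (cols.getD k [])[len - 1]? = some (colL.getLast hcol) := by
            rw [← h1, hInvk.2, List.getElem?_take_of_lt (by omega)]
          rw [hq]
          rfl
        have hdollA : PySem.List.pyGetD colL (-1) 0 = colL.getLast hcol :=
          PySem.List.pyGetD_neg_one colL 0 hcol
        set doll := colL.getLast hcol with hdoll
        -- A's new column table / B's new heights
        have hsetL : PySem.List.pySetD L (m - 1) colL.dropLast = L.set k colL.dropLast :=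
          pySetD_of_idx L (m - 1) colL.dropLast k (by rw [hLl]; exact hidx)
        have hsetH : PySem.List.pySetD H (m - 1) ((len : Int) - 1)
            = H.set k ((len : Int) - 1) :=
          pySetD_of_idx H (m - 1) ((len : Int) - 1) k (by rw [hHl]; exact hidx)
        -- the invariant is preserved
        have hInv2 : ∀ j, j < cols.length →
            (H.set k ((len : Int) - 1)).getD j 0
              = (((L.set k colL.dropLast).getD j []).length : Int) ∧
            (L.set k colL.dropLast).getD j []
              = (cols.getD j []).take ((L.set k colL.dropLast).getD j []).length := by
          intro j hj
          by_cases hjk : j = k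
          · subst hjk
            have hgl : (L.set j colL.dropLast).getD j [] = colL.dropLast := by
              rw [List.getD_eq_getElem?_getD,
                List.getElem?_eq_getElem (by rw [List.length_set]; omega),
                List.getElem_set_self]
              rfl
            have hgh : (H.set j ((len : Int) - 1)).getD j 0 = (len : Int) - 1 := by
              rw [List.getD_eq_getElem?_getD,
                List.getElem?_eq_getElem (by rw [List.length_set]; omega),
                List.getElem_set_self]
              rfl
            have hdl : colL.dropLast = (cols.getD j []).take (len - 1) := by
              conv_lhs => rw [hInvk.2]
              exact take_dropLast _ _ hlenle
            have hdllen : colL.dropLast.length = len - 1 := by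
              rw [List.length_dropLast]
            refine ⟨?_, ?_⟩
            · rw [hgl, hgh, hdllen]
              push_cast [hlen1]
              ring
            · rw [hgl, hdllen, hdl]
          · have hgl : (L.set k colL.dropLast).getD j [] = L.getD j [] := by
              rw [List.getD_eq_getElem?_getD,
                List.getElem?_eq_getElem (by rw [List.length_set]; omega),
                List.getElem_set_ne (fun h => hjk h.symm),
                List.getD_eq_getElem?_getD, List.getElem?_eq_getElem (by omega)]
            have hgh : (H.set k ((len : Int) - 1)).getD j 0 = H.getD j 0 := by
              rw [List.getD_eq_getElem?_getD,
                List.getElem?_eq_getElem (by rw [List.length_set]; omega),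
                List.getElem_set_ne (fun h => hjk h.symm),
                List.getD_eq_getElem?_getD, List.getElem?_eq_getElem (by omega)]
            rw [hgl, hgh]
            exact hInv j hj
        have hLl2 : (L.set k colL.dropLast).length = cols.length := by
          rw [List.length_set]; exact hLl
        have hHl2 : (H.set k ((len : Int) - 1)).length = cols.length := by
          rw [List.length_set]; exact hHl
        -- pickSeq takes its cons branch
        rw [hH, if_pos hHne, hdollB, hsetH]
        simp only [List.foldl_cons]
        -- case analysis on the cancellation
        rcases eq_or_ne S [] with hSe | hSne
        · subst hSe
          have hA' : solStepA (L, [], ans) m = (L.set k colL.dropLast, [doll], ans) := by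
            simp only [solStepA, hcL, ← hcolL, if_pos hcol, hdollA, ← hdoll, hsetL]
            simp
          have hB' : cancelStepB ([], ans) doll = ([doll], ans) := by
            simp [cancelStepB]
          rw [hA', hB']
          exact ih _ _ [doll] ans hLl2 hHl2 hInv2 (by simp)
        · have hSl : 0 < S.length := List.length_pos_of_ne_nil hSne
          have hgl : PySem.List.pyGetD S (-1) 0 = S.getLast hSne :=
            PySem.List.pyGetD_neg_one S 0 hSne
          have hlast2 : PySem.List.pyGetD (S ++ [doll]) (-2) 0 = S.getLast hSne := by
            rw [PySem.List.pyGetD_neg_ofNat (S ++ [doll]) 2 0 (by omega) (by simp; omega)]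
            rw [List.getLast_eq_getElem]
            rw [List.getElem_append_left (by simp; omega)]
            congr 1
            simp
          have hlast1 : PySem.List.pyGetD (S ++ [doll]) (-1) 0 = doll :=
            PySem.List.pyGetD_neg_one_append_singleton S doll 0
          have hlen22 : 2 ≤ (S ++ [doll]).length := by
            simp
            omega
          rcases eq_or_ne (S.getLast hSne) doll with heq | hne
          · have hA' : solStepA (L, S, ans) m
                = (L.set k colL.dropLast, S.dropLast, ans + 2) := by
              simp only [solStepA, hcL, hdollA, hsetL]
              rw [if_pos hcol, if_pos hcol, if_pos hlen22, hlast1, hlast2, if_pos heq.symm]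
              simp
            have hB' : cancelStepB (S, ans) doll = (S.dropLast, ans + 2) := by
              simp only [cancelStepB]
              rw [if_pos ⟨hSne, by rw [hgl]; exact heq⟩]
            rw [hA', hB']
            exact ih _ _ S.dropLast (ans + 2) hLl2 hHl2 hInv2 hS.dropLast
          · have hA' : solStepA (L, S, ans) m
                = (L.set k colL.dropLast, S ++ [doll], ans) := by
              simp only [solStepA, hcL, hdollA, hsetL]
              rw [if_pos hcol, if_pos hcol, if_pos hlen22, hlast1, hlast2,
                if_neg (fun e => hne e.symm)]
            have hB' : cancelStepB (S, ans) doll = (S ++ [doll], ans) := by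
              simp only [cancelStepB]
              rw [if_neg (by rw [hgl]; exact fun ⟨_, e⟩ => hne e)]
            have hch : List.IsChain (· ≠ ·) (S ++ [doll]) := by
              rw [List.isChain_append]
              refine ⟨hS, by simp, ?_⟩
              simp [List.getLast?_eq_some_getLast hSne, hne]
            rw [hA', hB']
            exact ih _ _ (S ++ [doll]) ans hLl2 hHl2 hInv2 hch

-- ===== VERDICT (by name: the statement is the Claim_ definition above) =====
theorem solution_spec : Claim_equal_solution := by
  intro board moves _ _
  show solution board moves = solution_alt board moves
  simp only [solution, solution_alt]
  set b := board.reverse with hb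
  set n := board.length with hn
  have hbl : b.length = n := by rw [hb, List.length_reverse]
  set cols := (PySem.List.pyRange 0 (n : Int) 1).map
    (fun c => b.map (fun row => PySem.List.pyGetD row c 0)) with hcols
  have hclen : cols.length = n := by simp [hcols]
  have hcget : ∀ k, k < n →
      cols.getD k [] = b.map (fun row => PySem.List.pyGetD row (k : Int) 0) := by
    intro k hk
    rw [List.getD_eq_getElem?_getD, hcols, PySem.List.getElem?_map_pyRange_zero _ n k hk]
    rfl
  -- A's new_board as structural column scans
  have hcolsA : (PySem.List.pyRange 0 (n : Int) 1).map
      (fun i => solColA b i (PySem.List.pyRange 0 (n : Int) 1) [])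
      = (PySem.List.pyRange 0 (n : Int) 1).map (fun c => solColB b c) := by
    apply List.map_congr_left
    intro i _
    have hc := col_eq b i b 0 [] (by simp)
    simp only [Nat.cast_zero, hbl] at hc
    rw [hc]
    simp
  rw [hcolsA]
  set L0 := (PySem.List.pyRange 0 (n : Int) 1).map (fun c => solColB b c) with hL0
  set H0 := (PySem.List.pyRange 0 (n : Int) 1).map
    (fun c => ((hWhileB (PySem.List.pyGetD cols c []) n 0 : Nat) : Int)) with hH0
  have hLl : L0.length = cols.length := by simp [hL0, hclen]
  have hHl : H0.length = cols.length := by simp [hH0, hclen]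
  have hLget : ∀ k, k < n → L0.getD k [] = solColB b (k : Int) := by
    intro k hk
    rw [List.getD_eq_getElem?_getD, hL0, PySem.List.getElem?_map_pyRange_zero _ n k hk]
    rfl
  have hHget : ∀ k, k < n →
      H0.getD k 0 = ((hWhileB (PySem.List.pyGetD cols (k : Int) []) n 0 : Nat) : Int) := by
    intro k hk
    rw [List.getD_eq_getElem?_getD, hH0, PySem.List.getElem?_map_pyRange_zero _ n k hk]
    rfl
  have hInv : ∀ k, k < cols.length →
      H0.getD k 0 = ((L0.getD k []).length : Int) ∧
      L0.getD k [] = (cols.getD k []).take (L0.getD k []).length := by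
    intro k hk
    rw [hclen] at hk
    have hck : PySem.List.pyGetD cols (k : Int) []
        = b.map (fun row => PySem.List.pyGetD row (k : Int) 0) := by
      rw [PySem.List.pyGetD_natCast, hcget k hk]
    have hw : hWhileB (PySem.List.pyGetD cols (k : Int) []) n 0
        = (solColB b (k : Int)).length := by
      rw [hck, ← hbl]
      have := hWhile_eq b (k : Int) 0 (Or.inr (by omega))
      simpa using this
    refine ⟨?_, ?_⟩
    · rw [hHget k hk, hLget k hk, hw]
    · rw [hLget k hk, hcget k hk]
      exact solColB_prefix b (k : Int)
  rw [pickFold_eq cols moves H0 []]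
  simpa using loop_eq cols moves L0 H0 [] 0 hLl hHl hInv (by simp)
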